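-- pv_equiv track=rewrite | github.com/yokosyun/atcoder-python | ABC/ABC006/C.py | solve
-- ===== SOURCE A (Python) =====
-- def solve(n, m):
--     for c in range(m + 1):
--         b = -2 * c + m - 2 * n
--         if b >= 0 and b <= m:
--             a = n - b - c
--             if a >= 0 and a <= m:
--                 return str(a) + " " + str(b) + " " + str(c)
--     return "-1 -1 -1"
-- ===== SOURCE B (Python) =====
-- def solve(n, m):
--     # Closed form: the loop's conditions on c are linear inequalities; the
--     # answer is the smallest c in the feasible interval [lo, hi], if any.
--     lo = max(0, -n, m - 3 * n)
--     hi = min(m, (m - 2 * n) // 2, 2 * m - 3 * n)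
--     if lo <= hi:
--         c = lo
--         b = m - 2 * n - 2 * c
--         a = n - b - c
--         return str(a) + " " + str(b) + " " + str(c)
--     return "-1 -1 -1"
-- ===== Notes on version B (the rewrite author's own statement) =====
-- stated objective: faster
-- what changed: Replaces the linear scan over c in range(m+1) by solving the four linear inequalities for c in closed form and taking the minimum of the feasible interval.
import Mathlib
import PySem

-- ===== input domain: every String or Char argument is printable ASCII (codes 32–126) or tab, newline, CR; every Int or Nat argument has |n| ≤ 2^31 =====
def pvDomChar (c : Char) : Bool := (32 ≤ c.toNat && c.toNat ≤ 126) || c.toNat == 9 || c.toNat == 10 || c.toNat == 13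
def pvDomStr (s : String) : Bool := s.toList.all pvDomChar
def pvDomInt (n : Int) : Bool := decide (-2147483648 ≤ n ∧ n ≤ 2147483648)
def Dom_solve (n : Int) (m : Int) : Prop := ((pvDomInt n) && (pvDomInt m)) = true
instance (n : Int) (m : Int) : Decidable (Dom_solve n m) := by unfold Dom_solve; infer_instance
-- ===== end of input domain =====

-- B replaces A's linear scan over c by solving the loop's linear inequalities in closed form (objective: faster).

-- ===== PORT A =====
-- the for-loop over range(m+1) with early return, as structural recursion over the range list
def solveLoop (n : Int) (m : Int) : List Int → String
  | [] => "-1 -1 -1"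
  | c :: rest =>
    let b := -2 * c + m - 2 * n
    if b ≥ 0 ∧ b ≤ m then
      let a := n - b - c
      if a ≥ 0 ∧ a ≤ m then
        PySem.Int.toStr a ++ " " ++ PySem.Int.toStr b ++ " " ++ PySem.Int.toStr c
      else solveLoop n m rest
    else solveLoop n m rest

def solve (n : Int) (m : Int) : String :=
  solveLoop n m (PySem.List.pyRange 0 (m + 1) 1)

-- ===== PORT B =====
def solve_alt (n : Int) (m : Int) : String :=
  let lo := max (max 0 (-n)) (m - 3 * n)
  let hi := min (min m (PySem.Int.floordiv (m - 2 * n) 2)) (2 * m - 3 * n)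
  if lo ≤ hi then
    let c := lo
    let b := m - 2 * n - 2 * c
    let a := n - b - c
    PySem.Int.toStr a ++ " " ++ PySem.Int.toStr b ++ " " ++ PySem.Int.toStr c
  else "-1 -1 -1"

-- ===== PRECONDITION & SPEC =====
def Spec_solve (n : Int) (m : Int) (out : String) : Prop := out = solve_alt n m
instance (n : Int) (m : Int) (out : String) : Decidable (Spec_solve n m out) := by unfold Spec_solve; infer_instance

-- ===== CLAIM (what is proved, stated in full; the proofs are below) =====
def Claim_equal_solve : Prop := ∀ (n : Int) (m : Int), Dom_solve n m → Spec_solve n m (solve n m)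

-- ===== LEMMAS AND PROOFS =====

-- abbreviations used only by the proofs
def pvLo (n m : Int) : Int := max (max 0 (-n)) (m - 3 * n)
def pvHi (n m : Int) : Int := min (min m (PySem.Int.floordiv (m - 2 * n) 2)) (2 * m - 3 * n)
def pvAns (n m c : Int) : String :=
  PySem.Int.toStr (n - (m - 2 * n - 2 * c) - c) ++ " " ++
    PySem.Int.toStr (m - 2 * n - 2 * c) ++ " " ++ PySem.Int.toStr c

theorem pvHi_le_m (n m : Int) : pvHi n m ≤ m := by
  unfold pvHi; omega

-- the loop's success test at c, for 0 ≤ c ≤ m, is exactly lo ≤ c ≤ hi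
theorem pvOk_iff (n m c : Int) (h0 : 0 ≤ c) (hm : c ≤ m) :
    ((-2 * c + m - 2 * n ≥ 0 ∧ -2 * c + m - 2 * n ≤ m) ∧
      (n - (-2 * c + m - 2 * n) - c ≥ 0 ∧ n - (-2 * c + m - 2 * n) - c ≤ m))
      ↔ (pvLo n m ≤ c ∧ c ≤ pvHi n m) := by
  unfold pvLo pvHi
  rw [PySem.Int.floordiv_eq_ediv_of_pos (by omega : (0:Int) < 2)]
  omega

theorem solveLoop_eq (n m : Int) (k : Int) (hk : 0 ≤ k) :
    solveLoop n m (PySem.List.pyRange k (m + 1) 1) =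
      if max k (pvLo n m) ≤ pvHi n m then pvAns n m (max k (pvLo n m)) else "-1 -1 -1" := by
  by_cases hkm : k ≤ m
  · rw [PySem.List.pyRange_one_cons (by omega : k < m + 1)]
    have ih := solveLoop_eq n m (k + 1) (by omega)
    show (if (-2 * k + m - 2 * n ≥ 0 ∧ -2 * k + m - 2 * n ≤ m) then
            (if (n - (-2 * k + m - 2 * n) - k ≥ 0 ∧ n - (-2 * k + m - 2 * n) - k ≤ m) then
              PySem.Int.toStr (n - (-2 * k + m - 2 * n) - k) ++ " " ++
                PySem.Int.toStr (-2 * k + m - 2 * n) ++ " " ++ PySem.Int.toStr k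
            else solveLoop n m (PySem.List.pyRange (k+1) (m+1) 1))
          else solveLoop n m (PySem.List.pyRange (k+1) (m+1) 1)) = _
    have hiff := pvOk_iff n m k hk hkm
    by_cases hok : pvLo n m ≤ k ∧ k ≤ pvHi n m
    · have hc := hiff.mpr hok
      rw [if_pos hc.1, if_pos hc.2, if_pos (by omega), max_eq_left hok.1]
      unfold pvAns
      have e : -2 * k + m - 2 * n = m - 2 * n - 2 * k := by ring
      rw [e]
    · have hnc : ¬ ((-2 * k + m - 2 * n ≥ 0 ∧ -2 * k + m - 2 * n ≤ m) ∧
          (n - (-2 * k + m - 2 * n) - k ≥ 0 ∧ n - (-2 * k + m - 2 * n) - k ≤ m)) := by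
        intro h; exact hok (hiff.mp h)
      have hrec : (if (-2 * k + m - 2 * n ≥ 0 ∧ -2 * k + m - 2 * n ≤ m) then
            (if (n - (-2 * k + m - 2 * n) - k ≥ 0 ∧ n - (-2 * k + m - 2 * n) - k ≤ m) then
              PySem.Int.toStr (n - (-2 * k + m - 2 * n) - k) ++ " " ++
                PySem.Int.toStr (-2 * k + m - 2 * n) ++ " " ++ PySem.Int.toStr k
            else solveLoop n m (PySem.List.pyRange (k+1) (m+1) 1))
          else solveLoop n m (PySem.List.pyRange (k+1) (m+1) 1)) =
          solveLoop n m (PySem.List.pyRange (k+1) (m+1) 1) := by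
        split_ifs with h1 h2
        · exact absurd ⟨h1, h2⟩ hnc
        · rfl
        · rfl
      rw [hrec, ih]
      by_cases hcase : k < pvLo n m
      · have h1 : max (k+1) (pvLo n m) = pvLo n m := by omega
        have h2 : max k (pvLo n m) = pvLo n m := by omega
        rw [h1, h2]
      · -- ¬ok and k ≥ lo ⇒ k > hi, both sides are the "-1" branch
        have hk_gt : pvHi n m < k := by omega
        rw [if_neg (by omega), if_neg (by omega)]
  · rw [PySem.List.pyRange_one_eq_nil (by omega : m + 1 ≤ k)]
    have : pvHi n m < max k (pvLo n m) := by
      have := pvHi_le_m n m; omega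
    show "-1 -1 -1" = _
    rw [if_neg (by omega)]
termination_by (m + 1 - k).toNat
decreasing_by omega

-- ===== VERDICT (by name: the statement is the Claim_ definition above) =====
theorem solve_spec : Claim_equal_solve := by
  intro n m _
  show solve n m = solve_alt n m
  unfold solve
  rw [solveLoop_eq n m 0 le_rfl]
  have hmax : max 0 (pvLo n m) = pvLo n m := by unfold pvLo; omega
  rw [hmax]
  rfl
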